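-- pv_equiv track=rewrite | github.com/tjrdbfl/Algorithm2 | backtracking/boardcover/boardcover1.py | generate_rotations
-- ===== SOURCE A (Python) =====
-- def rotate(block):
--     return list(zip(*reversed(block)))
--
-- def generate_rotations(block):
--     rotations=[[] for _ in range(4)]
--     for rot in range(4): # 모든 회전 형태에 대해서
--         originX=originY=-1 # 원점 초기화
--         for i in range(len(block)):
--             for j in range(len(block[0])):
--                 if block[i][j]==1:
--                     if originY==-1: # 가장 맨 윗쪽에 있는 칸이 원점
--                         originY,originX=i,j
--                     rotations[rot].append((i-originY,j-originX))
--
--         block=rotate(block)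
--
--     # block 의 회전 형태 중 중복이 있을 경우(상하/좌우) 중복을 제거
--     blocks={tuple(block) for block in rotations}
--     return list(blocks)
-- ===== SOURCE B (Python) =====
-- def generate_rotations(block):
--     # Work on a coordinate list instead of rotating and rescanning the 2D grid:
--     # collect the occupied cells once, then for each of the four rotations apply
--     # the 90-degree coordinate transform (r, c) -> (c, R - 1 - r), sort the cells
--     # row-major, and normalize so the first cell becomes the origin.
--     rows = len(block)
--     cols = len(block[0]) if block else 0
--     cells = [(i, j) for i in range(rows) for j in range(cols) if block[i][j] == 1]
--     shapes = []
--     for _ in range(4):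
--         ordered = sorted(cells)
--         if ordered:
--             oy, ox = ordered[0]
--             shapes.append(tuple((y - oy, x - ox) for y, x in ordered))
--         else:
--             shapes.append(())
--         cells = [(x, rows - 1 - y) for y, x in cells]
--         rows, cols = cols, rows
--     return list({shape for shape in shapes})
-- ===== Notes on version B (the rewrite author's own statement) =====
-- stated objective: faster
-- what changed: B collects the occupied cells as a coordinate list in one scan of the original grid, then for each of the four rotations applies the 90-degree coordinate transform (r,c)->(c,R-1-r), sorts row-major and normalizes by the first cell, instead of A's repeated zip(*reversed(...)) grid rotation and full 2D rescan with origin tracking.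
import Mathlib
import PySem

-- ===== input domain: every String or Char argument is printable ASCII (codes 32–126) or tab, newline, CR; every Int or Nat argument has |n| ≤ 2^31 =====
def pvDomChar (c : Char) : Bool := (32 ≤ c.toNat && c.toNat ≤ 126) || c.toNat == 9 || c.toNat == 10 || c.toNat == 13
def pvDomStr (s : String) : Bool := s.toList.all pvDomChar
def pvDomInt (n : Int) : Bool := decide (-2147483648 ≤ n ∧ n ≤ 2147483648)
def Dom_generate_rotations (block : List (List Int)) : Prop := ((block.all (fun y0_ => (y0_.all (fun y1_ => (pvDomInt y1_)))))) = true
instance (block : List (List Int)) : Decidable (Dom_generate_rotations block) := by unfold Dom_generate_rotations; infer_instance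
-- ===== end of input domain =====

-- B re-implements the rotation pipeline on a coordinate list (one grid scan, then
-- coordinate transforms + sort + normalize) instead of A's rotate-and-rescan of the
-- 2D grid; same return value (measurably faster on large grids in a timing run).
-- Both programs end with Python's 'list({...})' over ≤ 4 int-tuple shapes, whose order
-- is CPython's (hash-seed-independent) hash-table order; the pv*Hash/pvInsert/pvSetList
-- helpers below model that order exactly for this element type (set table of size 8,
-- ≤ 4 insertions, so no resize; int hash = n mod 2^61-1 with -1 ↦ -2; tuple hash =
-- CPython's xxHash combination) and are shared verbatim by BOTH ports.

-- exact CPython hash(int): |h| = |n| mod 2^61-1, sign kept, -1 ↦ -2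
def pvHashInt (n : Int) : Int :=
  let m : Int := 2305843009213693951
  let h : Int := if 0 ≤ n then n % m else -((-n) % m)
  if h = -1 then -2 else h

-- a signed CPython Py_hash_t reinterpreted as the unsigned 64-bit word (two's complement)
def pvU64 (n : Int) : UInt64 := UInt64.ofNat (n % 18446744073709551616).toNat

-- an unsigned 64-bit word reinterpreted as signed (two's complement)
def pvSigned (u : UInt64) : Int :=
  if u.toNat < 9223372036854775808 then (u.toNat : Int) else (u.toNat : Int) - 18446744073709551616

-- exact CPython tuple hash (the xxHash-based combination of the element hashes)
def pvTupleHash (lanes : List Int) (len : Nat) : Int :=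
  let acc := lanes.foldl (fun acc lh =>
    let acc := acc + pvU64 lh * 14029467366897019727
    let acc := (acc <<< 31) ||| (acc >>> 33)
    acc * 11400714785074694791) (2870177450012600261 : UInt64)
  let acc := acc + (UInt64.ofNat len ^^^ ((2870177450012600261 : UInt64) ^^^ 3527539))
  if acc = 18446744073709551615 then 1546275796 else pvSigned acc

def pvPairHash (p : Int × Int) : Int := pvTupleHash [pvHashInt p.1, pvHashInt p.2] 2

def pvShapeHash (t : List (Int × Int)) : Int := pvTupleHash (t.map pvPairHash) t.length

-- exact CPython set_add_entry probe loop for a table of size 8 (mask 7; LINEAR_PROBES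
-- never applies since 8 ≤ 9); the probe sequence i ↦ 5i+1+perturb visits every slot,
-- so fuel 64 is never exhausted for ≤ 4 occupied slots
def pvInsert : Nat → List (Option (Int × List (Int × Int))) → UInt64 → UInt64 → Int →
    List (Int × Int) → List (Option (Int × List (Int × Int)))
  | 0, table, _, _, _, _ => table
  | fuel + 1, table, i, perturb, h, s =>
    match table.getD i.toNat none with
    | none => table.set i.toNat (some (h, s))
    | some (h', s') =>
      if h' = h ∧ s' = s then table
      else
        let perturb := perturb >>> 5
        pvInsert fuel table ((i * 5 + 1 + perturb) &&& 7) perturb h s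

-- list({t for t in shapes}) for ≤ 4 int-tuple shapes: insert in order, read the table slots in order
def pvSetList (shapes : List (List (Int × Int))) : List (List (Int × Int)) :=
  (shapes.foldl (fun table s =>
      let h := pvShapeHash s
      pvInsert 64 table (pvU64 h &&& 7) (pvU64 h) h s)
    (List.replicate 8 none)).filterMap (fun e => e.map Prod.snd)

-- ===== PORT A =====
-- length of the shortest row (0 for no rows): how far zip(*…) reaches
def pvMinLen : List (List Int) → Nat
  | [] => 0
  | r :: rs => rs.foldl (fun a row => min a row.length) r.length

-- list(zip(*reversed(block))): zip truncates every column to the shortest row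
def pvRotate (g : List (List Int)) : List (List Int) :=
  let rg := g.reverse
  (List.range (pvMinLen rg)).map (fun j => rg.map (fun row => row.getD j 0))

-- the nested i/j scan of one rotation, threading (originY, originX, collected cells);
-- grid reads use pyGetD with a junk default: Pre_ guarantees every access is in range
def pvScan (g : List (List Int)) : Int × Int × List (Int × Int) :=
  (PySem.List.pyRange 0 g.length 1).foldl (fun st i =>
    (PySem.List.pyRange 0 g.headI.length 1).foldl (fun st j =>
      if PySem.List.pyGetD (PySem.List.pyGetD g i []) j 0 = 1 then
        let oY := if st.1 = -1 then i else st.1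
        let oX := if st.1 = -1 then j else st.2.1
        (oY, oX, st.2.2 ++ [(i - oY, j - oX)])
      else st) st) (-1, -1, [])

def generate_rotations (block : List (List Int)) : List (List (Int × Int)) :=
  let st := (List.range 4).foldl
    (fun (st : List (List (Int × Int)) × List (List Int)) _ =>
      (st.1 ++ [(pvScan st.2).2.2], pvRotate st.2)) ([], block)
  pvSetList st.1

-- ===== PORT B =====
-- the one coordinate-list scan: [(i, j) for i in range(rows) for j in range(cols) if block[i][j] == 1]
def pvCells (block : List (List Int)) (rows cols : Int) : List (Int × Int) :=
  (PySem.List.pyRange 0 rows 1).flatMap (fun i =>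
    ((PySem.List.pyRange 0 cols 1).filter
        (fun j => PySem.List.pyGetD (PySem.List.pyGetD block i []) j 0 = 1)).map (fun j => (i, j)))

def generate_rotations_alt (block : List (List Int)) : List (List (Int × Int)) :=
  let rows : Int := block.length
  let cols : Int := block.headI.length
  let cells := pvCells block rows cols
  let st := (List.range 4).foldl
    (fun (st : List (List (Int × Int)) × List (Int × Int) × Int × Int) _ =>
      let shapes := st.1
      let cells := st.2.1
      let rows := st.2.2.1
      let cols := st.2.2.2
      -- sorted(cells): Python compares int pairs lexicographically = the Int ×ₗ Int order
      let ordered := PySem.List.sorted cells (fun p => (toLex p : Int ×ₗ Int)) false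
      let shape := match ordered with
        | [] => ([] : List (Int × Int))
        | (oy, ox) :: _ => ordered.map (fun p => (p.1 - oy, p.2 - ox))
      (shapes ++ [shape], cells.map (fun p => (p.2, rows - 1 - p.1)), cols, rows))
    ([], cells, rows, cols)
  pvSetList st.1

-- ===== PRECONDITION & SPEC =====
-- Pre_ excludes exactly the inputs on which A raises IndexError: a row shorter than the
-- first row (the scan reads block[i][j] for every j < len(block[0])); B raises there too.
def Pre_generate_rotations (block : List (List Int)) : Prop :=
  ∀ row ∈ block, block.headI.length ≤ row.length

instance (block : List (List Int)) : Decidable (Pre_generate_rotations block) := by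
  unfold Pre_generate_rotations; infer_instance

def pvWitness_generate_rotations : List (List Int) := [[1, 1], [1, 0]]

def Spec_generate_rotations (block : List (List Int)) (out : List (List (Int × Int))) : Prop := out = generate_rotations_alt block
instance (block : List (List Int)) (out : List (List (Int × Int))) : Decidable (Spec_generate_rotations block out) := by unfold Spec_generate_rotations; infer_instance

-- ===== CLAIM (what is proved, stated in full; the proofs are below) =====
def Claim_equal_generate_rotations : Prop := ∀ (block : List (List Int)), Dom_generate_rotations block → Pre_generate_rotations block → Spec_generate_rotations block (generate_rotations block)

-- ===== LEMMAS AND PROOFS =====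

-- the strict lexicographic order Python uses to compare int pairs
def pvLexLt (a b : Int × Int) : Prop := (toLex a : Int ×ₗ Int) < toLex b

-- row-major cell list of a grid over Nat ranges: the common normal form of both ports
def pvCellsN (g : List (List Int)) (R C : Nat) : List (Int × Int) :=
  (List.range R).flatMap (fun i =>
    ((List.range C).filter (fun j => (g.getD i []).getD j 0 = 1)).map
      (fun (j : Nat) => ((i : Int), (j : Int))))

def pvCellsA (g : List (List Int)) : List (Int × Int) := pvCellsN g g.length g.headI.length

-- subtract the first cell from every cell
def pvNorm (l : List (Int × Int)) : List (Int × Int) :=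
  match l with
  | [] => []
  | (a, b) :: _ => l.map (fun p => (p.1 - a, p.2 - b))

-- "regular": no row shorter than the first one (= Pre_, preserved by pvRotate)
def pvReg (g : List (List Int)) : Prop := ∀ row ∈ g, g.headI.length ≤ row.length

-- the two loop bodies, named (definitionally the lambdas inside the ports)
def pvStepA (st : List (List (Int × Int)) × List (List Int)) (_ : Nat) :
    List (List (Int × Int)) × List (List Int) :=
  (st.1 ++ [(pvScan st.2).2.2], pvRotate st.2)

def pvStepB (st : List (List (Int × Int)) × List (Int × Int) × Int × Int) (_ : Nat) :
    List (List (Int × Int)) × List (Int × Int) × Int × Int :=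
  let shapes := st.1
  let cells := st.2.1
  let rows := st.2.2.1
  let cols := st.2.2.2
  let ordered := PySem.List.sorted cells (fun p => (toLex p : Int ×ₗ Int)) false
  let shape := match ordered with
    | [] => ([] : List (Int × Int))
    | (oy, ox) :: _ => ordered.map (fun p => (p.1 - oy, p.2 - ox))
  (shapes ++ [shape], cells.map (fun p => (p.2, rows - 1 - p.1)), cols, rows)

theorem pv_genA_eq (block : List (List Int)) :
    generate_rotations block = pvSetList ((List.range 4).foldl pvStepA ([], block)).1 := rfl

theorem pv_genB_eq (block : List (List Int)) :
    generate_rotations_alt block = pvSetList ((List.range 4).foldl pvStepB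
      ([], pvCells block block.length block.headI.length,
        (block.length : Int), (block.headI.length : Int))).1 := rfl

theorem pv_pyRange01 (n : Nat) :
    PySem.List.pyRange 0 (n : Int) 1 = (List.range n).map (fun (k : Nat) => (k : Int)) := by
  unfold PySem.List.pyRange
  simp only [if_neg one_ne_zero]
  have h1 : (((n : Int) - 0 + 1 - 1) / 1).toNat = n := by omega
  by_cases h : (0 : Int) < (n : Int)
  · rw [if_pos h, h1]; simp
  · rw [if_neg h]
    have : n = 0 := by omega
    subst this; simp

theorem pv_foldl_flatMap {α β σ : Type} (f : α → List β) (step : σ → β → σ) :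
    ∀ (l : List α) (s : σ),
      l.foldl (fun st a => (f a).foldl step st) s = (l.flatMap f).foldl step s := by
  intro l
  induction l with
  | nil => intro s; rfl
  | cons x xs ih => intro s; simp [List.flatMap_cons, List.foldl_append, ih]

-- the origin-threading step of A's scan, named
def pvOStep (st : Int × Int × List (Int × Int)) (p : Int × Int) : Int × Int × List (Int × Int) :=
  let oY := if st.1 = -1 then p.1 else st.1
  let oX := if st.1 = -1 then p.2 else st.2.1
  (oY, oX, st.2.2 ++ [(p.1 - oY, p.2 - oX)])

theorem pv_foldl_ostep_ne (l : List (Int × Int)) :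
    ∀ (oY oX : Int) (acc : List (Int × Int)), oY ≠ -1 →
      l.foldl pvOStep (oY, oX, acc) =
        (oY, oX, acc ++ l.map (fun p => (p.1 - oY, p.2 - oX))) := by
  induction l with
  | nil => intro oY oX acc _; simp
  | cons x xs ih =>
    intro oY oX acc h
    simp only [List.foldl_cons, pvOStep, if_neg h, List.map_cons]
    rw [ih _ _ _ h]
    simp

theorem pv_foldl_ostep_start (l : List (Int × Int)) (hpos : ∀ p ∈ l, 0 ≤ p.1) :
    (l.foldl pvOStep (-1, -1, [])).2.2 = pvNorm l := by
  cases l with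
  | nil => rfl
  | cons x xs =>
    obtain ⟨a, b⟩ := x
    have ha : a ≠ -1 := by have := hpos (a, b) (by simp); simp at this; omega
    have hstep : pvOStep (-1, -1, []) (a, b) = (a, b, [(a - a, b - b)]) := by
      simp [pvOStep]
    rw [List.foldl_cons, hstep, pv_foldl_ostep_ne xs a b _ ha]
    simp [pvNorm]

theorem pv_mem_pvCellsN {g : List (List Int)} {R C : Nat} {p : Int × Int} :
    p ∈ pvCellsN g R C ↔
      ∃ i j : Nat, i < R ∧ j < C ∧ (g.getD i []).getD j 0 = 1 ∧ p = ((i : Int), (j : Int)) := by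
  unfold pvCellsN
  rw [List.mem_flatMap]
  constructor
  · rintro ⟨i, hi, hp⟩
    rw [List.mem_map] at hp
    obtain ⟨j, hj, rfl⟩ := hp
    rw [List.mem_filter, List.mem_range] at hj
    rw [List.mem_range] at hi
    exact ⟨i, j, hi, hj.1, by simpa using hj.2, rfl⟩
  · rintro ⟨i, j, hi, hj, hc, rfl⟩
    refine ⟨i, by simpa using hi, ?_⟩
    rw [List.mem_map]
    refine ⟨j, ?_, rfl⟩
    rw [List.mem_filter]
    exact ⟨by simpa using hj, by simpa using hc⟩

theorem pv_pairwise_pvCellsN (g : List (List Int)) (R C : Nat) :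
    (pvCellsN g R C).Pairwise pvLexLt := by
  unfold pvCellsN
  rw [List.pairwise_flatMap]
  constructor
  · intro i _
    rw [List.pairwise_map]
    apply List.Pairwise.imp ?_ (List.Pairwise.filter _ List.pairwise_lt_range)
    intro a b h
    simp [pvLexLt, Prod.Lex.lt_iff]
    omega
  · apply List.Pairwise.imp ?_ List.pairwise_lt_range
    intro a b h x hx y hy
    simp only [List.mem_map, List.mem_filter] at hx hy
    obtain ⟨ja, _, rfl⟩ := hx
    obtain ⟨jb, _, rfl⟩ := hy
    simp [pvLexLt, Prod.Lex.lt_iff]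
    omega

theorem pv_nodup_pvCellsN (g : List (List Int)) (R C : Nat) : (pvCellsN g R C).Nodup := by
  apply List.Pairwise.imp ?_ (pv_pairwise_pvCellsN g R C)
  intro a b h heq
  rw [heq] at h
  exact lt_irrefl _ h

theorem pv_pairwise_pvCellsA (g : List (List Int)) :
    (pvCellsA g).Pairwise (fun a b => (toLex a : Int ×ₗ Int) < toLex b) :=
  pv_pairwise_pvCellsN g _ _

-- A's scan is the normalized row-major cell list
theorem pvScan_eq_norm (g : List (List Int)) : (pvScan g).2.2 = pvNorm (pvCellsA g) := by
  have hshow : pvScan g =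
      (PySem.List.pyRange 0 (g.length : Int) 1).foldl (fun st i =>
        (PySem.List.pyRange 0 (g.headI.length : Int) 1).foldl (fun st j =>
          if PySem.List.pyGetD (PySem.List.pyGetD g i []) j 0 = 1 then pvOStep st (i, j)
          else st) st) (-1, -1, []) := rfl
  rw [hshow]
  have hinner : ∀ (i : Int) (l : List Int) (st : Int × Int × List (Int × Int)),
      l.foldl (fun st j =>
        if PySem.List.pyGetD (PySem.List.pyGetD g i []) j 0 = 1 then pvOStep st (i, j)
        else st) st =
      ((l.filter
          (fun j => PySem.List.pyGetD (PySem.List.pyGetD g i []) j 0 = 1)).map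
        (fun j => (i, j))).foldl pvOStep st := by
    intro i l
    induction l with
    | nil => intro st; rfl
    | cons x xs ih =>
      intro st
      by_cases h : PySem.List.pyGetD (PySem.List.pyGetD g i []) x 0 = 1 <;>
        simp [h, ih]
  simp only [hinner]
  rw [pv_foldl_flatMap (fun i => (((PySem.List.pyRange 0 (g.headI.length : Int) 1).filter
      (fun j => PySem.List.pyGetD (PySem.List.pyGetD g i []) j 0 = 1)).map (fun j => (i, j))))
      pvOStep]
  have hcells : (PySem.List.pyRange 0 (g.length : Int) 1).flatMap
      (fun i => (((PySem.List.pyRange 0 (g.headI.length : Int) 1).filter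
        (fun j => PySem.List.pyGetD (PySem.List.pyGetD g i []) j 0 = 1)).map
          (fun j => (i, j)))) = pvCellsA g := by
    rw [pv_pyRange01, pv_pyRange01]
    unfold pvCellsA pvCellsN
    rw [List.flatMap_map]
    apply List.flatMap_congr ?_
    intro i _
    rw [List.filter_map, List.map_map]
    simp only [Function.comp_def, PySem.List.pyGetD_natCast]
  rw [hcells]
  apply pv_foldl_ostep_start
  intro p hp
  rw [pvCellsA, pv_mem_pvCellsN] at hp
  obtain ⟨i, j, _, _, _, rfl⟩ := hp
  exact Int.natCast_nonneg i

-- B's initial comprehension is the same list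
theorem pvCells_eq (block : List (List Int)) :
    pvCells block (block.length : Int) (block.headI.length : Int) = pvCellsA block := by
  unfold pvCells pvCellsA pvCellsN
  rw [pv_pyRange01, pv_pyRange01, List.flatMap_map]
  apply List.flatMap_congr ?_
  intro i _
  rw [List.filter_map, List.map_map]
  simp only [Function.comp_def, PySem.List.pyGetD_natCast]

-- ---- pvRotate: dimensions, entries, regularity ----

theorem pv_minLen_le (rs : List (List Int)) :
    ∀ (a : Nat), rs.foldl (fun x row => min x row.length) a ≤ a := by
  induction rs with
  | nil => intro a; exact le_refl a
  | cons r rs ih =>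
    intro a
    exact le_trans (ih _) (Nat.min_le_left _ _)

theorem pv_minLen_le_mem (rs : List (List Int)) :
    ∀ (a : Nat) (r : List Int), r ∈ rs → rs.foldl (fun x row => min x row.length) a ≤ r.length := by
  induction rs with
  | nil => intro a r h; cases h
  | cons x xs ih =>
    intro a r h
    rcases List.mem_cons.mp h with h | h
    · subst h
      exact le_trans (pv_minLen_le xs _) (Nat.min_le_right _ _)
    · exact ih _ _ h

theorem pv_le_minLen (rs : List (List Int)) :
    ∀ (a c : Nat), c ≤ a → (∀ r ∈ rs, c ≤ r.length) →
      c ≤ rs.foldl (fun x row => min x row.length) a := by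
  induction rs with
  | nil => intro a c h _; exact h
  | cons x xs ih =>
    intro a c h hall
    exact ih _ _ (le_min h (hall x (by simp))) (fun r hr => hall r (by simp [hr]))

theorem pvMinLen_le_headI (g : List (List Int)) :
    pvMinLen g.reverse ≤ g.headI.length := by
  cases hrev : g.reverse with
  | nil =>
    have : g = [] := by simpa using congrArg List.reverse hrev
    simp [this, pvMinLen]
  | cons x xs =>
    have hg : g ≠ [] := by
      intro h
      rw [h] at hrev
      simp at hrev
    have hmem : g.headI ∈ g.reverse := by
      rw [List.mem_reverse]
      cases g with
      | nil => cases hg rfl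
      | cons r rs => simp
    rw [hrev] at hmem
    show xs.foldl (fun a row => min a row.length) x.length ≤ _
    rcases List.mem_cons.mp hmem with h | h
    · rw [← h]
      exact pv_minLen_le xs _
    · exact pv_minLen_le_mem xs _ _ h

theorem pvMinLen_eq_of_reg (g : List (List Int)) (hreg : pvReg g) :
    pvMinLen g.reverse = g.headI.length := by
  apply le_antisymm (pvMinLen_le_headI g)
  cases hrev : g.reverse with
  | nil =>
    have hgnil : g = [] := by simpa using congrArg List.reverse hrev
    subst hgnil
    exact Nat.le_refl 0
  | cons x xs =>
    show _ ≤ xs.foldl (fun a row => min a row.length) x.length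
    have hx : x ∈ g := by
      have : x ∈ g.reverse := by simp [hrev]
      simpa using this
    apply pv_le_minLen
    · exact hreg x hx
    · intro r hr
      apply hreg r
      have : r ∈ g.reverse := by simp [hrev, hr]
      simpa using this

theorem pvRotate_length (g : List (List Int)) : (pvRotate g).length = pvMinLen g.reverse := by
  simp [pvRotate]

theorem pvRotate_rows_len (g : List (List Int)) :
    ∀ row ∈ pvRotate g, row.length = g.reverse.length := by
  intro row hrow
  unfold pvRotate at hrow
  simp only [List.mem_map] at hrow
  obtain ⟨j, _, rfl⟩ := hrow
  simp

theorem pvRotate_reg (g : List (List Int)) : pvReg (pvRotate g) := by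
  intro row hrow
  rw [pvRotate_rows_len g row hrow]
  have hne : pvRotate g ≠ [] := List.ne_nil_of_mem hrow
  have hh : (pvRotate g).headI ∈ pvRotate g := by
    cases h : pvRotate g with
    | nil => cases hne h
    | cons a t => simp
  rw [pvRotate_rows_len g _ hh]

theorem pvRotate_headI_length (g : List (List Int)) (hm : 0 < pvMinLen g.reverse) :
    (pvRotate g).headI.length = g.length := by
  simp only [pvRotate]
  obtain ⟨m, hm'⟩ : ∃ m, pvMinLen g.reverse = m + 1 :=
    ⟨pvMinLen g.reverse - 1, by omega⟩
  rw [hm', List.range_succ_eq_map]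
  simp

-- entry formula: (rotate g)[i][j] = g[len g - 1 - j][i]  (i < min row length, j < len g)
theorem pvRotate_entry (g : List (List Int)) {i j : Nat}
    (hi : i < pvMinLen g.reverse) (hj : j < g.length) :
    ((pvRotate g).getD i []).getD j 0 = (g.getD (g.length - 1 - j) []).getD i 0 := by
  have h1 : (pvRotate g).getD i [] = g.reverse.map (fun row => row.getD i 0) := by
    simp only [pvRotate]
    rw [List.getD_eq_getElem _ _ (by simpa using hi)]
    simp
  rw [h1]
  have hj' : j < (g.reverse.map (fun row => row.getD i 0)).length := by simpa using hj
  rw [List.getD_eq_getElem _ _ hj', List.getElem_map, List.getElem_reverse,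
    List.getD_eq_getElem _ _ (show g.length - 1 - j < g.length by omega)]

-- membership in the rotated grid's cell list
theorem pv_mem_cellsA_rotate (g : List (List Int)) (hreg : pvReg g) {p : Int × Int} :
    p ∈ pvCellsA (pvRotate g) ↔
      ∃ i j : Nat, i < g.headI.length ∧ j < g.length ∧
        (g.getD (g.length - 1 - j) []).getD i 0 = 1 ∧ p = ((i : Int), (j : Int)) := by
  have hm := pvMinLen_eq_of_reg g hreg
  rw [pvCellsA, pv_mem_pvCellsN]
  constructor
  · rintro ⟨i, j, hi, hj, hc, rfl⟩
    rw [pvRotate_length, hm] at hi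
    have hmpos : 0 < pvMinLen g.reverse := by rw [hm]; omega
    have hglen : j < g.length := by
      rw [pvRotate_headI_length g hmpos] at hj
      exact hj
    refine ⟨i, j, hi, hglen, ?_, rfl⟩
    rw [← pvRotate_entry g (by rw [hm]; exact hi) hglen]
    exact hc
  · rintro ⟨i, j, hi, hj, hc, rfl⟩
    have hmpos : 0 < pvMinLen g.reverse := by rw [hm]; omega
    refine ⟨i, j, ?_, ?_, ?_, rfl⟩
    · rw [pvRotate_length, hm]; exact hi
    · rw [pvRotate_headI_length g hmpos]; exact hj
    · rw [pvRotate_entry g (by rw [hm]; exact hi) hj]; exact hc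

-- the rotated cell list is the coordinate transform of the original, as a multiset
theorem pvRotate_cells_perm (g : List (List Int)) (hreg : pvReg g) :
    ((pvCellsA g).map (fun p => (p.2, (g.length : Int) - 1 - p.1))).Perm
      (pvCellsA (pvRotate g)) := by
  have hinj : Function.Injective (fun p : Int × Int => (p.2, (g.length : Int) - 1 - p.1)) := by
    intro p q h
    simp only [Prod.mk.injEq] at h
    obtain ⟨h1, h2⟩ := h
    exact Prod.ext (by omega) h1
  apply (List.perm_ext_iff_of_nodup
    (List.Nodup.map hinj (pv_nodup_pvCellsN g _ _)) (pv_nodup_pvCellsN _ _ _)).mpr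
  intro p
  show p ∈ (pvCellsA g).map (fun p => (p.2, (g.length : Int) - 1 - p.1)) ↔
    p ∈ pvCellsA (pvRotate g)
  rw [pv_mem_cellsA_rotate g hreg]
  simp only [List.mem_map]
  constructor
  · rintro ⟨q, hq, rfl⟩
    rw [pvCellsA, pv_mem_pvCellsN] at hq
    obtain ⟨y, x, hy, hx, hc, rfl⟩ := hq
    refine ⟨x, g.length - 1 - y, hx, by omega,
      by rwa [(show g.length - 1 - (g.length - 1 - y) = y by omega)], ?_⟩
    simp only [Prod.mk.injEq]
    refine ⟨trivial, ?_⟩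
    omega
  · rintro ⟨i, j, hi, hj, hc, rfl⟩
    refine ⟨(Nat.cast (g.length - 1 - j), Nat.cast i), ?_, ?_⟩
    · rw [pvCellsA, pv_mem_pvCellsN]
      exact ⟨g.length - 1 - j, i, by omega, hi, hc, rfl⟩
    · simp only [Prod.mk.injEq]
      refine ⟨trivial, ?_⟩
      omega

-- no occupied cell in the scanned region ⟹ none anywhere after a rotation
theorem pv_cellsA_rotate_of_nil (g : List (List Int)) (h : pvCellsA g = []) :
    pvCellsA (pvRotate g) = [] := by
  rw [List.eq_nil_iff_forall_not_mem]
  intro p hp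
  rw [pvCellsA, pv_mem_pvCellsN] at hp
  obtain ⟨i, j, hi, hj, hc, rfl⟩ := hp
  rw [pvRotate_length] at hi
  cases hg : g with
  | nil =>
    subst hg
    simp [pvMinLen] at hi
  | cons r rs =>
    rw [← hg] at *
    have hglen : j < g.length := by
      have hmpos : 0 < pvMinLen g.reverse := by omega
      rw [pvRotate_headI_length g hmpos] at hj
      exact hj
    have hi' : i < g.headI.length := lt_of_lt_of_le hi (pvMinLen_le_headI g)
    have : ((Nat.cast (g.length - 1 - j) : Int), (Nat.cast i : Int)) ∈ pvCellsA g := by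
      rw [pvCellsA, pv_mem_pvCellsN]
      refine ⟨g.length - 1 - j, i, by omega, hi', ?_, rfl⟩
      rw [← pvRotate_entry g hi hglen]
      exact hc
    rw [h] at this
    cases this

-- one synchronized loop step, iterated
theorem pv_iter (l : List Nat) :
    ∀ (g : List (List Int)) (shapes : List (List (Int × Int)))
      (cells : List (Int × Int)) (rows cols : Int),
      pvReg g → cells.Perm (pvCellsA g) →
      (cells ≠ [] → rows = (g.length : Int) ∧ cols = (g.headI.length : Int)) →
      (l.foldl pvStepA (shapes, g)).1 = (l.foldl pvStepB (shapes, cells, rows, cols)).1 := by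
  induction l with
  | nil => intros; rfl
  | cons n t ih =>
    intro g shapes cells rows cols hreg hperm hdim
    simp only [List.foldl_cons]
    have hsorted : PySem.List.sorted cells (fun p => (toLex p : Int ×ₗ Int)) false = pvCellsA g :=
      PySem.List.sorted_eq_of_perm_of_pairwise_lt _ _ _ hperm.symm (pv_pairwise_pvCellsA g)
    have hstepB : pvStepB (shapes, cells, rows, cols) n =
        (shapes ++ [pvNorm (pvCellsA g)],
          cells.map (fun p => (p.2, rows - 1 - p.1)), cols, rows) := by
      simp only [pvStepB, hsorted]
      rfl
    have hstepA : pvStepA (shapes, g) n = (shapes ++ [pvNorm (pvCellsA g)], pvRotate g) := by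
      simp only [pvStepA, pvScan_eq_norm]
    rw [hstepA, hstepB]
    by_cases hc : cells = []
    · subst hc
      have hnil : pvCellsA g = [] := (hperm.symm).eq_nil
      apply ih
      · exact pvRotate_reg g
      · simp [pv_cellsA_rotate_of_nil g hnil]
      · intro h; cases h rfl
    · obtain ⟨hrows, hcols⟩ := hdim hc
      subst hrows; subst hcols
      apply ih
      · exact pvRotate_reg g
      · exact (hperm.map _).trans (pvRotate_cells_perm g hreg)
      · intro _
        have hm := pvMinLen_eq_of_reg g hreg
        have hne : pvCellsA g ≠ [] := by
          intro hnil2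
          rw [hnil2] at hperm
          exact hc hperm.eq_nil
        have hpos : 0 < g.headI.length ∧ 0 < g.length := by
          rcases List.exists_mem_of_ne_nil _ hne with ⟨p, hp⟩
          rw [pvCellsA, pv_mem_pvCellsN] at hp
          obtain ⟨i, j, hi, hj, _, _⟩ := hp
          omega
        constructor
        · rw [pvRotate_length, hm]
        · rw [pvRotate_headI_length g (by omega)]

theorem pv_main (block : List (List Int)) (h : Pre_generate_rotations block) :
    generate_rotations block = generate_rotations_alt block := by
  rw [pv_genA_eq, pv_genB_eq]
  congr 1
  apply pv_iter
  · exact h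
  · rw [pvCells_eq]
  · intro _
    exact ⟨rfl, rfl⟩

-- ===== VERDICT (by name: the statement is the Claim_ definition above) =====
theorem generate_rotations_spec : Claim_equal_generate_rotations := by
  intro block _ hpre
  unfold Spec_generate_rotations
  exact pv_main block hpre
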